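-- pv_equiv track=rewrite | github.com/michal-slezak-dev/matury-informatyka | nowa_formuła/2021/czerwiec/zadanie4_3.py | transform_into_palindrome
-- ===== SOURCE A (Python) =====
-- from collections import deque
-- from copy import deepcopy
--
-- def is_palindrome(string):
--     if string == string[::-1]:
--         return True
--     return False
--
-- def transform_into_palindrome(string, chars):
--     string = deque(string) # to do: sprobowac zrobic tak, ze na jednym napisie operuje a nie na 2 kopiach
--
--     for char in chars:
--
--         string_left = deepcopy(string)
--         string_right = deepcopy(string)
--
--         string_left.appendleft(char)
--         string_right.append(char)
--
--         if is_palindrome("".join(list(string_left))):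
--             return "".join(list(string_left))
--         elif is_palindrome("".join(list(string_right))):
--             return "".join(list(string_right))
--         elif not is_palindrome("".join(list(string_left))):
--             string_left.popleft()
--         elif not is_palindrome("".join(list(string_right))):
--             string_right.pop()
-- ===== SOURCE B (Python) =====
-- def transform_into_palindrome(string, chars):
--     # Empty string: prepending any char yields a 1-char palindrome.
--     if not string:
--         return chars[0] if chars else None
--     left_ok = string[:-1] == string[:-1][::-1]   # char+string is a palindrome iff char == string[-1] and this
--     right_ok = string[1:] == string[1:][::-1]    # string+char is a palindrome iff char == string[0] and this
--     for char in chars: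
--         if char == string[-1] and left_ok:
--             return char + string
--         if char == string[0] and right_ok:
--             return string + char
--     return None
-- ===== Notes on version B (the rewrite author's own statement) =====
-- stated objective: faster
-- what changed: B checks is_palindrome(string[:-1]) and is_palindrome(string[1:]) once before the loop and then tests each candidate char against string's endpoints in O(1), instead of building and palindrome-testing two full copies of the string per char.
import Mathlib
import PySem

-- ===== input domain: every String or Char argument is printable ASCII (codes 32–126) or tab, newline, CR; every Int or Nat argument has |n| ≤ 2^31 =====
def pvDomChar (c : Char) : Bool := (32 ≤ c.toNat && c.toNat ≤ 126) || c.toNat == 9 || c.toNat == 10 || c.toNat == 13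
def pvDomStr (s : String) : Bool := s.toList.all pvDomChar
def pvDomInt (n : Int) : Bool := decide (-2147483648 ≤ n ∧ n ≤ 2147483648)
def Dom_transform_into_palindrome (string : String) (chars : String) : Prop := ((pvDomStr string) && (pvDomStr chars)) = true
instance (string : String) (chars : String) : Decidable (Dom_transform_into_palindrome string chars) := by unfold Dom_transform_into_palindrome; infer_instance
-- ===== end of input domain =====

-- B hoists the two palindrome checks out of the loop and compares each char to string's
-- endpoints in O(1), replacing A's per-char build-and-test of two full copies (faster).


-- ===== PORT A =====
-- Python strings are ported via their character lists; s[::-1] is List.reverse.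
-- A's loop: for each char, build char+string and string+char, return the first palindrome;
-- the two trailing 'elif not is_palindrome' branches only mutate local copies (no effect),
-- so each iteration either returns or falls through to the next char.
def pvLoopA (l : List Char) : List Char → Option String
  | [] => none
  | c :: cs =>
    let string_left := c :: l
    let string_right := l ++ [c]
    if string_left = string_left.reverse then some (String.mk string_left)
    else if string_right = string_right.reverse then some (String.mk string_right)
    else pvLoopA l cs

def transform_into_palindrome (string : String) (chars : String) : Option String :=
  pvLoopA string.toList chars.toList

-- ===== PORT B =====
-- string[:-1] = dropLast, string[1:] = tail, string[-1] = last element, string[0] = head.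
def pvLoopB (hd lst : Char) (leftOk rightOk : Bool) (l : List Char) : List Char → Option String
  | [] => none
  | c :: cs =>
    if c = lst ∧ leftOk then some (String.mk (c :: l))
    else if c = hd ∧ rightOk then some (String.mk (l ++ [c]))
    else pvLoopB hd lst leftOk rightOk l cs

def transform_into_palindrome_alt (string : String) (chars : String) : Option String :=
  match string.toList with
  | [] =>
    -- empty string: return chars[0] if chars else None
    match chars.toList with
    | [] => none
    | c :: _ => some (String.mk [c])
  | a :: t =>
    let l := a :: t
    let leftOk := decide (l.dropLast = l.dropLast.reverse)
    let rightOk := decide (t = t.reverse)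
    pvLoopB a (t.getLastD a) leftOk rightOk l chars.toList

-- ===== PRECONDITION & SPEC =====
def Spec_transform_into_palindrome (string : String) (chars : String) (out : Option String) : Prop := out = transform_into_palindrome_alt string chars
instance (string : String) (chars : String) (out : Option String) : Decidable (Spec_transform_into_palindrome string chars out) := by unfold Spec_transform_into_palindrome; infer_instance

-- ===== CLAIM (what is proved, stated in full; the proofs are below) =====
def Claim_equal_transform_into_palindrome : Prop := ∀ (string : String) (chars : String), Dom_transform_into_palindrome string chars → Spec_transform_into_palindrome string chars (transform_into_palindrome string chars)

-- ===== LEMMAS AND PROOFS =====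

-- c :: l is a palindrome iff c equals l's last char and l without it is a palindrome.
theorem pv_pal_cons (c a : Char) (t : List Char) :
    (c :: a :: t = (c :: a :: t).reverse) ↔
      (c = t.getLastD a ∧ (a :: t).dropLast = ((a :: t).dropLast).reverse) := by
  have hne : a :: t ≠ [] := by simp
  have hsplit : (a :: t).dropLast ++ [(a :: t).getLast hne] = a :: t :=
    List.dropLast_append_getLast hne
  have hlast : (a :: t).getLast hne = t.getLastD a := by
    simp [List.getLast_eq_getLastD]
  set d := (a :: t).dropLast with hd
  set x := t.getLastD a
  rw [hlast] at hsplit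
  constructor
  · intro h
    rw [← hsplit] at h
    have h' : c :: (d ++ [x]) = x :: (d.reverse ++ [c]) := by
      simpa [List.reverse_append] using h
    have hc : c = x := by exact (List.cons.injEq _ _ _ _ ▸ h').1
    refine ⟨hc, ?_⟩
    have htail : d ++ [x] = d.reverse ++ [c] := (List.cons.injEq _ _ _ _ ▸ h').2
    rw [hc] at htail
    exact List.append_cancel_right htail
  · rintro ⟨hc, hp⟩
    rw [← hsplit]
    simp [List.reverse_append, hc, ← hp]

-- l ++ [c] is a palindrome iff c equals l's head and l without it is a palindrome.
theorem pv_pal_append (c a : Char) (t : List Char) :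
    ((a :: t) ++ [c] = ((a :: t) ++ [c]).reverse) ↔ (c = a ∧ t = t.reverse) := by
  constructor
  · intro h
    have h' : a :: (t ++ [c]) = c :: (t.reverse ++ [a]) := by
      simpa [List.reverse_append] using h
    have hc : a = c := (List.cons.injEq _ _ _ _ ▸ h').1
    refine ⟨hc.symm, ?_⟩
    have htail : t ++ [c] = t.reverse ++ [a] := (List.cons.injEq _ _ _ _ ▸ h').2
    rw [← hc] at htail
    exact List.append_cancel_right htail
  · rintro ⟨hc, hp⟩
    simp [List.reverse_append, hc, ← hp]

theorem pv_loop_eq (a : Char) (t : List Char) (cs : List Char) :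
    pvLoopA (a :: t) cs =
      pvLoopB a (t.getLastD a) (decide ((a :: t).dropLast = ((a :: t).dropLast).reverse))
        (decide (t = t.reverse)) (a :: t) cs := by
  induction cs with
  | nil => simp [pvLoopA, pvLoopB]
  | cons c cs ih =>
    simp only [pvLoopA, pvLoopB, pv_pal_cons, pv_pal_append, decide_eq_true_iff, ih]

-- ===== VERDICT (by name: the statement is the Claim_ definition above) =====
theorem transform_into_palindrome_spec : Claim_equal_transform_into_palindrome := by
  intro string chars _
  unfold Spec_transform_into_palindrome transform_into_palindrome transform_into_palindrome_alt
  cases hs : string.toList with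
  | nil =>
    cases hc : chars.toList with
    | nil => simp [pvLoopA]
    | cons c cs => simp [pvLoopA]
  | cons a t => exact pv_loop_eq a t chars.toList
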